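-- pv_equiv track=rewrite | github.com/ZixiuLiu/LAZOR-Group-project | Lazors_solution/Lazor_project.py | final_check
-- ===== SOURCE A (Python) =====
-- import copy
--
-- def final_check(lazor_possible, P_list, board_possible):
--     '''
--
--     This function is for check all the probabilities and find the correct answer
--
--     **Parameters**
--
--         lazor_possible: *list*
--             The list that store all the probablities of lazor coordinates
--         P_list: *list*
--             The list that store the destinations
--         board_possible: *list*
--             The list that store all the board conditions
--
--     **Returns**
--
--         board_possible[i]: *list*
--             The board condition of correct soltion
--
--     '''
--     # For each probability
--     for i in range(len(lazor_possible)):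
--         # Copy the P_list as test_list
--         test_list = copy.deepcopy(P_list)
--         # For each lazer path in each probability
--         for j in range(len(lazor_possible[i])):
--             # For each point in each path in each probability
--             for k in range(len(lazor_possible[i][j])):
--                 # Check if the point is inside the copied list
--                 if lazor_possible[i][j][k] in test_list:
--                     # If so, remove the found point from the copied list
--                     test_list.remove(lazor_possible[i][j][k])
--         # If the copied list is empty, this is the correct solution, then return the corresponding board condition
--         if test_list == []:
--             return board_possible[i]
-- ===== SOURCE B (Python) =====
-- def final_check(lazor_possible, P_list, board_possible):
--     for i in range(len(lazor_possible)):
--         # Build a frequency table of every point on every path of this candidate.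
--         counts = {}
--         for path in lazor_possible[i]:
--             for p in path:
--                 counts[p] = counts.get(p, 0) + 1
--         # Consume one occurrence per target; all consumed => candidate covers targets.
--         ok = True
--         for p in P_list:
--             c = counts.get(p, 0)
--             if c == 0:
--                 ok = False
--                 break
--             counts[p] = c - 1
--         if ok:
--             return board_possible[i]
-- ===== Notes on version B (the rewrite author's own statement) =====
-- stated objective: alternative
-- what changed: Replaced A's deepcopy-and-destructively-remove shrinking-list scan with a hash-counter pass: build a frequency dict of the candidate's flattened path points once, then consume one count per target, so the inner list scans (membership test and remove) disappear.
-- outside the precondition, e.g. on final_check([[[(0, 0)]]], [(0, 0)], []): A raises IndexError, B raises IndexError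
import Mathlib
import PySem

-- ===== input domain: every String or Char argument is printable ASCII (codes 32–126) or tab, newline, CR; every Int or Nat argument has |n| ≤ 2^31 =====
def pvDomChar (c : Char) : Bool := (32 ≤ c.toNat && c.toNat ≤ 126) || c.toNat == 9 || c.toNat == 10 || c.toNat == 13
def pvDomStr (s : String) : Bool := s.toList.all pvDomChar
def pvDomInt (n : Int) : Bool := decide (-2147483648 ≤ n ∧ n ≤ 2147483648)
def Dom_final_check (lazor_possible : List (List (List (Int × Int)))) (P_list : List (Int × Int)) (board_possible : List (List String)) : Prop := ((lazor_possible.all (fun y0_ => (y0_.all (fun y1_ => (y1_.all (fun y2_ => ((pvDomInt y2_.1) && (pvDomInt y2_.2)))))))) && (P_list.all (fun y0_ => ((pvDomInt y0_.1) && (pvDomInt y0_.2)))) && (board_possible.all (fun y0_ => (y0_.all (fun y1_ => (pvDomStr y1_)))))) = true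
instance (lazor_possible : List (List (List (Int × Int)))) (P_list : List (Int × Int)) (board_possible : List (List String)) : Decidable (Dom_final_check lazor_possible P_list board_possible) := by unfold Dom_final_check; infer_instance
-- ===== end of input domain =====

-- B replaces A's deepcopy-and-destructive-remove scan by building a frequency dict of the
-- candidate's path points once and consuming one count per target (objective: alternative).


-- ===== PORT A =====
-- A's body: for each candidate i, deep-copy P_list, walk every point of every path and
-- remove it from the copy when present; if the copy is empty return board_possible[i].
def pvA_loop (P_list : List (Int × Int)) (board_possible : List (List String)) :
    List (List (List (Int × Int)) × Nat) → Option (List String)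
  | [] => none
  | (paths, i) :: rest =>
    let test_list := paths.foldl
      (fun t path => path.foldl
        (fun t p => if p ∈ t then (PySem.List.remove? t p).getD t else t) t) P_list
    if test_list = [] then PySem.List.pyGet? board_possible (i : Int)
    else pvA_loop P_list board_possible rest

def final_check (lazor_possible : List (List (List (Int × Int)))) (P_list : List (Int × Int)) (board_possible : List (List String)) : Option (List String) :=
  pvA_loop P_list board_possible lazor_possible.zipIdx

-- ===== PORT B =====
-- B's body: counts[p] = counts.get(p, 0) + 1 over every point of every path.
def pvCounts (paths : List (List (Int × Int))) : PySem.Dict (Int × Int) Int :=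
  paths.foldl (fun d path => path.foldl (fun d p => d.insert p (d.getD p 0 + 1)) d)
    PySem.Dict.empty

-- B's body: the consume loop over P_list (with early break on a missing target).
def pvConsume : PySem.Dict (Int × Int) Int → List (Int × Int) → Bool
  | _, [] => true
  | d, p :: rest =>
    let c := d.getD p 0
    if c = 0 then false else pvConsume (d.insert p (c - 1)) rest

-- B's outer loop, recursing over the candidates with an explicit index accumulator.
def pvB_go (P_list : List (Int × Int)) (board_possible : List (List String)) (i : Nat) :
    List (List (List (Int × Int))) → Option (List String)
  | [] => none
  | paths :: rest =>
    if pvConsume (pvCounts paths) P_list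
    then PySem.List.pyGet? board_possible (i : Int)
    else pvB_go P_list board_possible (i + 1) rest

def final_check_alt (lazor_possible : List (List (List (Int × Int)))) (P_list : List (Int × Int)) (board_possible : List (List String)) : Option (List String) :=
  pvB_go P_list board_possible 0 lazor_possible

-- ===== PRECONDITION & SPEC =====
-- Pre_ excludes exactly the inputs where the Python raises IndexError: the first candidate
-- whose paths cover all of P_list (as a multiset) has no board of that index in board_possible.
def pvCovers (paths : List (List (Int × Int))) (P_list : List (Int × Int)) : Bool :=
  P_list.all (fun p => P_list.count p ≤ (paths.flatten).count p)

def Pre_final_check (lazor_possible : List (List (List (Int × Int)))) (P_list : List (Int × Int)) (board_possible : List (List String)) : Prop :=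
  lazor_possible.findIdx (fun paths => pvCovers paths P_list) = lazor_possible.length ∨
  lazor_possible.findIdx (fun paths => pvCovers paths P_list) < board_possible.length
instance (lazor_possible : List (List (List (Int × Int)))) (P_list : List (Int × Int)) (board_possible : List (List String)) : Decidable (Pre_final_check lazor_possible P_list board_possible) := by unfold Pre_final_check; infer_instance

def pvWitness_final_check : (List (List (List (Int × Int)))) × (List (Int × Int)) × List (List String) :=
  ([[[(0, 0), (1, 0)]]], [(1, 0)], [["A", "o"]])

def Spec_final_check (lazor_possible : List (List (List (Int × Int)))) (P_list : List (Int × Int)) (board_possible : List (List String)) (out : Option (List String)) : Prop := out = final_check_alt lazor_possible P_list board_possible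
instance (lazor_possible : List (List (List (Int × Int)))) (P_list : List (Int × Int)) (board_possible : List (List String)) (out : Option (List String)) : Decidable (Spec_final_check lazor_possible P_list board_possible out) := by unfold Spec_final_check; infer_instance

-- ===== CLAIM (what is proved, stated in full; the proofs are below) =====
def Claim_equal_final_check : Prop := ∀ (lazor_possible : List (List (List (Int × Int)))) (P_list : List (Int × Int)) (board_possible : List (List String)), Dom_final_check lazor_possible P_list board_possible → Pre_final_check lazor_possible P_list board_possible → Spec_final_check lazor_possible P_list board_possible (final_check lazor_possible P_list board_possible)

-- ===== LEMMAS AND PROOFS =====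

-- One removal step of A: the count of p drops by one exactly when the removed element is p
-- and is still present.
theorem pv_count_step (t : List (Int × Int)) (q p : Int × Int) :
    ((if q ∈ t then (PySem.List.remove? t q).getD t else t).count p)
      = t.count p - (if q = p then min (t.count q) 1 else 0) := by
  by_cases hq : q ∈ t
  · rw [if_pos hq, PySem.List.remove?_eq_some_erase _ _ hq]
    simp only [Option.getD_some]
    rw [List.count_erase]
    have : (0 : Nat) < t.count q := List.count_pos_iff.mpr hq
    by_cases hpq : q = p
    · subst hpq; simp; omega
    · simp [hpq, beq_iff_eq]
  · rw [if_neg hq]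
    have : t.count q = 0 := by
      simpa using List.count_eq_zero.mpr hq
    by_cases hpq : q = p
    · subst hpq; omega
    · simp [hpq]

-- A's whole removal pass over a list L of points: truncated subtraction of counts.
theorem pv_count_fold (L : List (Int × Int)) (t : List (Int × Int)) (p : Int × Int) :
    ((L.foldl (fun t q => if q ∈ t then (PySem.List.remove? t q).getD t else t) t).count p)
      = t.count p - L.count p := by
  induction L generalizing t with
  | nil => simp
  | cons q L ih =>
    simp only [List.foldl_cons]
    rw [ih, pv_count_step, List.count_cons]
    rcases eq_or_ne q p with rfl | hpq
    · simp only [beq_self_eq_true, if_true]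
      omega
    · simp [hpq]

-- The nested per-path folds of A are the single fold over the flattened point list.
theorem pv_fold_flatten (paths : List (List (Int × Int))) (t : List (Int × Int)) :
    paths.foldl (fun t path => path.foldl
        (fun t q => if q ∈ t then (PySem.List.remove? t q).getD t else t) t) t
      = paths.flatten.foldl
        (fun t q => if q ∈ t then (PySem.List.remove? t q).getD t else t) t := by
  induction paths generalizing t with
  | nil => simp
  | cons path paths ih => simp [List.foldl_append, ih]

-- A's emptiness test characterised by count containment.
theorem pv_test_iff (paths : List (List (Int × Int))) (P : List (Int × Int)) :
    (paths.foldl (fun t path => path.foldl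
        (fun t q => if q ∈ t then (PySem.List.remove? t q).getD t else t) t) P = [])
      ↔ (∀ p ∈ P, P.count p ≤ paths.flatten.count p) := by
  rw [pv_fold_flatten]
  constructor
  · intro h p hp
    have := pv_count_fold paths.flatten P p
    rw [h] at this
    simp only [List.count_nil] at this
    omega
  · intro h
    rw [List.eq_nil_iff_forall_not_mem]
    intro p hp
    have hc : (0 : Nat) < (paths.flatten.foldl
        (fun t q => if q ∈ t then (PySem.List.remove? t q).getD t else t) P).count p :=
      List.count_pos_iff.mpr hp
    rw [pv_count_fold] at hc
    have hpP : p ∈ P := by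
      by_contra hnp
      have : P.count p = 0 := List.count_eq_zero.mpr hnp
      omega
    have := h p hpP
    omega

-- B's counter build equals PySem's counter of the flattened points.
theorem pv_counts_eq (paths : List (List (Int × Int))) (p : Int × Int) :
    (pvCounts paths).getD p 0 = (paths.flatten.count p : Int) := by
  have h : pvCounts paths
      = paths.flatten.foldl (fun d p => d.insert p (d.getD p 0 + 1)) PySem.Dict.empty := by
    unfold pvCounts
    generalize PySem.Dict.empty = d
    induction paths generalizing d with
    | nil => simp
    | cons path paths ih => simp [List.foldl_append, ih]
  rw [h, PySem.Dict.foldl_insert_getD_add_one_eq_counter, PySem.Dict.getD_counter]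

-- B's consume loop succeeds iff every target's multiplicity fits in the table.
theorem pv_consume_iff (P : List (Int × Int)) :
    ∀ (d : PySem.Dict (Int × Int) Int), (∀ p, 0 ≤ d.getD p 0) →
    (pvConsume d P = true ↔ ∀ p ∈ P, (P.count p : Int) ≤ d.getD p 0) := by
  induction P with
  | nil => intro d _; simp [pvConsume]
  | cons p rest ih =>
    intro d hpos
    simp only [pvConsume]
    by_cases hc : d.getD p 0 = 0
    · rw [if_pos hc]
      simp only [Bool.false_eq_true, false_iff]
      intro h
      have := h p (List.mem_cons_self)
      rw [List.count_cons_self, hc] at this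
      push_cast at this
      omega
    · rw [if_neg hc]
      have h1 : 1 ≤ d.getD p 0 := by have := hpos p; omega
      have hpos' : ∀ q, 0 ≤ (d.insert p (d.getD p 0 - 1)).getD q 0 := by
        intro q
        rw [PySem.Dict.getD_insert]
        split_ifs with hqp
        · omega
        · exact hpos q
      rw [ih _ hpos']
      constructor
      · intro h q hq
        rcases List.mem_cons.mp hq with rfl | hqr
        · rw [List.count_cons_self]
          by_cases hr : q ∈ rest
          · have := h q hr
            rw [PySem.Dict.getD_insert, if_pos rfl] at this
            push_cast
            omega
          · have : rest.count q = 0 := List.count_eq_zero.mpr hr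
            rw [this]
            push_cast
            omega
        · by_cases hqp : q = p
          · subst hqp
            rw [List.count_cons_self]
            by_cases hr : q ∈ rest
            · have := h q hr
              rw [PySem.Dict.getD_insert, if_pos rfl] at this
              push_cast
              omega
            · have : rest.count q = 0 := List.count_eq_zero.mpr hr
              rw [this]
              push_cast
              omega
          · have := h q hqr
            rw [PySem.Dict.getD_insert, if_neg hqp] at this
            rw [List.count_cons_of_ne (fun h => hqp h.symm)]
            exact this
      · intro h q hq
        rw [PySem.Dict.getD_insert]
        by_cases hqp : q = p
        · subst hqp
          rw [if_pos rfl]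
          have := h q (List.mem_cons_self)
          rw [List.count_cons_self] at this
          push_cast at this ⊢
          omega
        · rw [if_neg hqp]
          have := h q (List.mem_cons.mpr (Or.inr hq))
          rw [List.count_cons_of_ne (fun h => hqp h.symm)] at this
          exact this

-- A's per-candidate test equals B's per-candidate test.
theorem pv_test_eq (paths : List (List (Int × Int))) (P : List (Int × Int)) :
    (paths.foldl (fun t path => path.foldl
        (fun t q => if q ∈ t then (PySem.List.remove? t q).getD t else t) t) P = [])
      ↔ pvConsume (pvCounts paths) P = true := by
  rw [pv_test_iff, pv_consume_iff _ _ (fun p => by rw [pv_counts_eq]; positivity)]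
  constructor
  · intro h p hp
    rw [pv_counts_eq]
    exact_mod_cast h p hp
  · intro h p hp
    have := h p hp
    rw [pv_counts_eq] at this
    exact_mod_cast this

-- The two outer loops agree, for any start index.
theorem pv_loop_eq (P : List (Int × Int)) (bd : List (List String)) :
    ∀ (l : List (List (List (Int × Int)))) (i : Nat),
    pvA_loop P bd (l.zipIdx i) = pvB_go P bd i l := by
  intro l
  induction l with
  | nil => intro i; rfl
  | cons paths rest ih =>
    intro i
    simp only [List.zipIdx_cons, pvA_loop, pvB_go]
    by_cases h : (paths.foldl (fun t path => path.foldl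
        (fun t q => if q ∈ t then (PySem.List.remove? t q).getD t else t) t) P = [])
    · rw [if_pos h, if_pos ((pv_test_eq paths P).mp h)]
    · rw [if_neg h, if_neg (fun hb => h ((pv_test_eq paths P).mpr hb)), ih]

-- ===== VERDICT (by name: the statement is the Claim_ definition above) =====
theorem final_check_spec : Claim_equal_final_check := by
  intro lz P bd _ _
  unfold Spec_final_check final_check final_check_alt
  exact pv_loop_eq P bd lz 0
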